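-- pv_equiv track=rewrite | github.com/EkremKarnas/Credit-Risk-Analysis-Portfolio | app.py | _split_cat_raw
-- ===== SOURCE A (Python) =====
-- def _split_cat_raw(raw: str, cat_cols):
--     """Safely splits a one-hot encoded feature name like 'cat__COL_NAME_VALUE' into ('COL_NAME', 'VALUE')."""
--     name = raw.replace("cat__", "")
--     # Find the longest matching column name to handle cases where column names contain underscores
--     match = None
--     for c in sorted(cat_cols, key=len, reverse=True):
--         if name == c or name.startswith(c + "_"):
--             match = c
--             break
--     if match is None:
--         return None, name
--     level = name[len(match) + 1 :] if len(name) > len(match) else ""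
--     return match, level
-- ===== SOURCE B (Python) =====
-- def _split_cat_raw(raw: str, cat_cols):
--     """Same result as A: scan candidate split positions of the name from right to left
--     and test membership in a set of the columns, instead of sorting the columns."""
--     name = raw.replace("cat__", "")
--     cols = set(cat_cols)
--     for i in range(len(name), -1, -1):
--         if (i == len(name) or name[i] == "_") and name[:i] in cols:
--             return name[:i], (name[i + 1:] if i < len(name) else "")
--     return None, name
-- ===== Notes on version B (the rewrite author's own statement) =====
-- stated objective: alternative
-- what changed: Instead of sorting cat_cols by length and taking the first matching column, B scans the candidate split positions of the name from right to left and tests each prefix for membership in a set of the columns, so the longest match is found without any sort.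
import Mathlib
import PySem

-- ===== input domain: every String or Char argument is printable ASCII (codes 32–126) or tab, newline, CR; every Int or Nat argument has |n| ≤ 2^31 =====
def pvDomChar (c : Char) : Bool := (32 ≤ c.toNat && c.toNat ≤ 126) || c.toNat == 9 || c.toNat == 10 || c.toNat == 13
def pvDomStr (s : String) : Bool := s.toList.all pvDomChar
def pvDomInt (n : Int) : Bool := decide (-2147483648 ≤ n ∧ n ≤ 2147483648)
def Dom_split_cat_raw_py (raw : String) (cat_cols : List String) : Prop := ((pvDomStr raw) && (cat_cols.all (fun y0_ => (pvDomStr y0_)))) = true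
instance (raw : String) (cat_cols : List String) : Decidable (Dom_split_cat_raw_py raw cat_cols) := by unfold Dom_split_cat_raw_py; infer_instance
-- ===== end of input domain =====

-- ===== PORT A =====
-- B replaces A's 'sort the columns by length, take the first matching column' with a right-to-left
-- scan over the split POSITIONS of the name, testing each candidate prefix against a set of the
-- columns (simpler: no sort; provably the same result).
def pvFindMatchA (name : String) : List String → Option String
  | [] => none
  | c :: rest =>
    if name == c || PySem.Str.startswith name (c ++ "_") then some c
    else pvFindMatchA name rest

def split_cat_raw_py (raw : String) (cat_cols : List String) : Option String × String :=
  let name := PySem.Str.replace raw "cat__" ""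
  match pvFindMatchA name (PySem.List.sorted cat_cols (fun c => PySem.Str.len c) true) with
  | none => (none, name)
  | some m =>
    let level := if PySem.Str.len name > PySem.Str.len m then
        PySem.Str.slice name (some ((PySem.Str.len m : Int) + 1)) none
      else ""
    (some m, level)

-- ===== PORT B =====
-- position i is a valid split point: it ends the name or sits on '_', and name[:i] is a known column
def pvOkB (name : String) (cols : PySem.Set String) (i : Nat) : Bool :=
  (decide ((i : Int) = PySem.Str.len name) || (PySem.Str.pyGet? name (i : Int) == some '_')) &&
  PySem.Set.contains cols (PySem.Str.slice name none (some (i : Int)))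

-- for i in range(len(name), -1, -1): first valid split point, scanning downward
def pvScanB (name : String) (cols : PySem.Set String) : Nat → Option Nat
  | 0 => if pvOkB name cols 0 then some 0 else none
  | i + 1 => if pvOkB name cols (i + 1) then some (i + 1) else pvScanB name cols i

def split_cat_raw_py_alt (raw : String) (cat_cols : List String) : Option String × String :=
  let name := PySem.Str.replace raw "cat__" ""
  let cols := PySem.Set.ofList cat_cols
  match pvScanB name cols name.toList.length with
  | none => (none, name)
  | some i =>
    (some (PySem.Str.slice name none (some (i : Int))),
     if (i : Int) < PySem.Str.len name then PySem.Str.slice name (some ((i : Int) + 1)) none else "")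

-- ===== PRECONDITION & SPEC =====
def Spec_split_cat_raw_py (raw : String) (cat_cols : List String) (out : Option String × String) : Prop := out = split_cat_raw_py_alt raw cat_cols
instance (raw : String) (cat_cols : List String) (out : Option String × String) : Decidable (Spec_split_cat_raw_py raw cat_cols out) := by unfold Spec_split_cat_raw_py; infer_instance

-- ===== CLAIM (what is proved, stated in full; the proofs are below) =====
def Claim_equal_split_cat_raw_py : Prop := ∀ (raw : String) (cat_cols : List String), Dom_split_cat_raw_py raw cat_cols → Spec_split_cat_raw_py raw cat_cols (split_cat_raw_py raw cat_cols)

-- ===== LEMMAS AND PROOFS =====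

-- the match predicate A tests
def pvP (name c : String) : Bool := name == c || PySem.Str.startswith name (c ++ "_")

lemma pvP_iff (name c : String) :
    pvP name c = true ↔ name = c ∨ (c.toList ++ ['_']) <+: name.toList := by
  unfold pvP
  rw [Bool.or_eq_true, beq_iff_eq, PySem.Str.startswith_eq, PySem.Chars.startswith_iff]
  simp

lemma pvP_len_le (name c : String) (h : pvP name c = true) :
    c.toList.length ≤ name.toList.length := by
  rw [pvP_iff] at h
  rcases h with h | h
  · simp [h]
  · have := h.length_le
    simp only [List.length_append, List.length_cons, List.length_nil, String.length_toList] at this ⊢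
    omega

lemma pvP_take (name c : String) (h : pvP name c = true) :
    c.toList = name.toList.take c.toList.length := by
  rw [pvP_iff] at h
  rcases h with h | h
  · simp [h]
  · have hpre : c.toList <+: name.toList := ((List.prefix_append _ _).trans h)
    exact (List.prefix_iff_eq_take.mp hpre)

-- A's scan over the length-descending list: spec of the first match
lemma pvFindMatchA_spec (name : String) (L : List String)
    (hp : L.Pairwise (fun a b => b.length ≤ a.length)) :
    (pvFindMatchA name L = none → ∀ c ∈ L, pvP name c = false) ∧
    (∀ m, pvFindMatchA name L = some m → pvP name m = true ∧ m ∈ L ∧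
      ∀ c ∈ L, pvP name c = true → c.length ≤ m.length) := by
  induction L with
  | nil => simp [pvFindMatchA]
  | cons c rest ih =>
    rcases List.pairwise_cons.mp hp with ⟨hc, hrest⟩
    obtain ⟨ihn, ihs⟩ := ih hrest
    by_cases h : pvP name c = true
    · refine ⟨?_, ?_⟩
      · intro hnone; simp only [pvFindMatchA, pvP] at hnone h; rw [h] at hnone; simp at hnone
      · intro m hm
        have hmc : m = c := by
          simp only [pvFindMatchA, pvP] at hm h; rw [h] at hm
          simpa using hm.symm
        subst hmc
        refine ⟨h, List.mem_cons_self, ?_⟩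
        intro c' hc' _
        rcases List.mem_cons.mp hc' with h' | h'
        · rw [h']
        · exact hc c' h'
    · have hstep : pvFindMatchA name (c :: rest) = pvFindMatchA name rest := by
        simp only [pvFindMatchA, pvP] at h ⊢
        rw [Bool.not_eq_true] at h; rw [h]; simp
      refine ⟨?_, ?_⟩
      · intro hnone c' hc'
        rcases List.mem_cons.mp hc' with h' | h'
        · rw [h']; simpa using h
        · exact ihn (by rwa [hstep] at hnone) c' h'
      · intro m hm
        rw [hstep] at hm
        obtain ⟨hPm, hmem, hmax⟩ := ihs m hm
        refine ⟨hPm, List.mem_cons_of_mem _ hmem, ?_⟩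
        intro c' hc' hPc'
        rcases List.mem_cons.mp hc' with h' | h'
        · exact absurd (h' ▸ hPc') h
        · exact hmax c' h' hPc'

-- a valid split point (within the name) is exactly the length of a matching column
lemma pvOkB_iff (name : String) (cat_cols : List String) (i : Nat) (hi : i ≤ name.toList.length) :
    pvOkB name (PySem.Set.ofList cat_cols) i = true ↔
      ∃ c ∈ cat_cols, pvP name c = true ∧ c.toList.length = i := by
  unfold pvOkB
  rw [Bool.and_eq_true, Bool.or_eq_true]
  have hcont : PySem.Set.contains (PySem.Set.ofList cat_cols) (PySem.Str.slice name none (some (i : Int))) = true ↔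
      PySem.Str.slice name none (some (i : Int)) ∈ cat_cols := by
    simp [PySem.Set.contains, PySem.Set.mem_ofList]
  have hslice : (PySem.Str.slice name none (some (i : Int))).toList = name.toList.take i := by
    simp [PySem.Str.slice]
  constructor
  · rintro ⟨hcond, hmem⟩
    refine ⟨PySem.Str.slice name none (some (i : Int)), hcont.mp hmem, ?_, ?_⟩
    · rw [pvP_iff]
      rcases hcond with hcond | hcond
      · left
        have hlen : i = name.toList.length := by
          rw [PySem.Str.len_eq] at hcond
          simp only [decide_eq_true_eq, Nat.cast_inj] at hcond
          exact hcond
        apply String.toList_inj.mp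
        rw [hslice, hlen, List.take_length]
      · right
        have hget : name.toList[i]? = some '_' := by
          simpa using (beq_iff_eq.mp hcond)
        have hlt : i < name.toList.length := (List.getElem?_eq_some_iff.mp hget).1
        rw [hslice]
        refine ⟨name.toList.drop (i + 1), ?_⟩
        have : name.toList.take i ++ ['_'] = name.toList.take (i + 1) := by
          rw [List.take_add_one, hget]; rfl
        rw [this, List.take_append_drop]
    · rw [hslice, List.length_take]
      simp only [String.length_toList] at hi ⊢
      omega
  · rintro ⟨c, hmem, hP, hlen⟩
    have hc : c.toList = name.toList.take i := hlen ▸ pvP_take name c hP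
    have hcs : PySem.Str.slice name none (some (i : Int)) = c :=
      String.toList_inj.mp (by rw [hslice, hc])
    refine ⟨?_, hcont.mpr (hcs ▸ hmem)⟩
    rw [pvP_iff] at hP
    rcases hP with h | h
    · left
      rw [PySem.Str.len_eq]
      simp only [decide_eq_true_eq, Nat.cast_inj]
      rw [h] at *
      simp only [String.length_toList] at hlen ⊢
      omega
    · right
      have hpre : name.toList.take i ++ ['_'] <+: name.toList := by rw [← hc]; exact h
      obtain ⟨t, ht⟩ := hpre
      have htk : (name.toList.take i).length = i := by
        rw [List.length_take]
        simp only [String.length_toList] at hi ⊢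
        omega
      have hget : name.toList[i]? = some '_' := by
        conv_lhs => rw [← ht]
        rw [List.append_assoc, List.getElem?_append_right (htk.le)]
        simp [htk]
      simp [hget]

-- B's downward scan: first valid split point below the fuel bound
lemma pvScanB_spec (name : String) (cols : PySem.Set String) (i : Nat) :
    (∀ j, pvScanB name cols i = some j → j ≤ i ∧ pvOkB name cols j = true ∧
        ∀ k, j < k → k ≤ i → pvOkB name cols k = false) ∧
    (pvScanB name cols i = none → ∀ k ≤ i, pvOkB name cols k = false) := by
  induction i with
  | zero =>
    constructor
    · intro j hj
      unfold pvScanB at hj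
      split_ifs at hj with h
      injection hj with hj; subst hj
      exact ⟨le_rfl, h, by omega⟩
    · intro hn k hk
      unfold pvScanB at hn
      split_ifs at hn with h
      interval_cases k
      simpa using h
  | succ i ih =>
    obtain ⟨ihs, ihn⟩ := ih
    constructor
    · intro j hj
      unfold pvScanB at hj
      split_ifs at hj with h
      · injection hj with hj; subst hj
        exact ⟨le_rfl, h, by omega⟩
      · obtain ⟨hle, hok, hmax⟩ := ihs j hj
        refine ⟨by omega, hok, ?_⟩
        intro k hk1 hk2
        rcases Nat.lt_or_ge k (i + 1) with h' | h'
        · exact hmax k hk1 (by omega)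
        · have : k = i + 1 := by omega
          subst this; simpa using h
    · intro hn k hk
      unfold pvScanB at hn
      split_ifs at hn with h
      rcases Nat.lt_or_ge k (i + 1) with h' | h'
      · exact ihn hn k (by omega)
      · have : k = i + 1 := by omega
        subst this; simpa using h

-- the core equality: A's first match over the sorted list agrees with B's position scan
lemma pvCore_eq (name : String) (cat_cols : List String) :
    (match pvFindMatchA name (PySem.List.sorted cat_cols (fun c => PySem.Str.len c) true) with
      | none => ((none : Option String), name)
      | some m =>
        (some m, if PySem.Str.len name > PySem.Str.len m then
            PySem.Str.slice name (some ((PySem.Str.len m : Int) + 1)) none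
          else "")) =
    (match pvScanB name (PySem.Set.ofList cat_cols) name.toList.length with
      | none => ((none : Option String), name)
      | some i =>
        (some (PySem.Str.slice name none (some (i : Int))),
         if (i : Int) < PySem.Str.len name then PySem.Str.slice name (some ((i : Int) + 1)) none else "")) := by
  set S := PySem.List.sorted cat_cols (fun c => PySem.Str.len c) true with hS
  have hp : S.Pairwise (fun a b => b.length ≤ a.length) := by
    have := PySem.List.sorted_pairwise_rev cat_cols (fun c => PySem.Str.len c)
    refine this.imp ?_
    intro a b h; simpa [PySem.Str.len] using h
  have hmemS : ∀ x, x ∈ S ↔ x ∈ cat_cols := fun x =>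
    PySem.List.mem_sorted cat_cols (fun c => PySem.Str.len c) true x
  obtain ⟨hAn, hAs⟩ := pvFindMatchA_spec name S hp
  obtain ⟨hBs, hBn⟩ := pvScanB_spec name (PySem.Set.ofList cat_cols) name.toList.length
  cases hA : pvFindMatchA name S with
  | none =>
    cases hB : pvScanB name (PySem.Set.ofList cat_cols) name.toList.length with
    | none => rfl
    | some j =>
      obtain ⟨hle, hok, -⟩ := hBs j hB
      obtain ⟨c, hmem, hP, -⟩ := (pvOkB_iff name cat_cols j hle).mp hok
      have := hAn hA c ((hmemS c).mpr hmem)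
      rw [hP] at this; simp at this
  | some mA =>
    obtain ⟨hPmA, hmemA, hmaxA⟩ := hAs mA hA
    have hi0 : mA.toList.length ≤ name.toList.length := pvP_len_le name mA hPmA
    have hok0 : pvOkB name (PySem.Set.ofList cat_cols) mA.toList.length = true :=
      (pvOkB_iff name cat_cols mA.toList.length hi0).mpr
        ⟨mA, (hmemS mA).mp hmemA, hPmA, rfl⟩
    cases hB : pvScanB name (PySem.Set.ofList cat_cols) name.toList.length with
    | none =>
      have := hBn hB mA.toList.length hi0
      rw [hok0] at this; simp at this
    | some j =>
      obtain ⟨hle, hok, hmax⟩ := hBs j hB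
      obtain ⟨c, hmem, hP, hlen⟩ := (pvOkB_iff name cat_cols j hle).mp hok
      have hcle : c.length ≤ mA.length := hmaxA c ((hmemS c).mpr hmem) hP
      have hj : j = mA.toList.length := by
        rcases Nat.lt_trichotomy j mA.toList.length with h' | h' | h'
        · have := hmax mA.toList.length h' hi0
          rw [hok0] at this; simp at this
        · exact h'
        · exfalso
          have hcle' : c.toList.length ≤ mA.toList.length := by
            simpa only [String.length_toList] using hcle
          omega
      subst hj
      have hslice : PySem.Str.slice name none (some (mA.toList.length : Int)) = mA := by
        apply String.toList_inj.mp
        have h1 := pvP_take name mA hPmA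
        simp only [String.length_toList] at h1
        simp [PySem.Str.slice]
        exact h1.symm
      have hcond : (PySem.Str.len name > PySem.Str.len mA) ↔
          ((mA.toList.length : Int) < PySem.Str.len name) := by
        simp [PySem.Str.len_eq]
      simp only [hslice]
      by_cases hc : (mA.toList.length : Int) < PySem.Str.len name
      · rw [if_pos (hcond.mpr hc), if_pos hc]
        rw [PySem.Str.len_eq]
      · rw [if_neg (fun h => hc (hcond.mp h)), if_neg hc]

-- ===== VERDICT (by name: the statement is the Claim_ definition above) =====
theorem split_cat_raw_py_spec : Claim_equal_split_cat_raw_py := by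
  intro raw cat_cols _
  unfold Spec_split_cat_raw_py split_cat_raw_py split_cat_raw_py_alt
  exact pvCore_eq (PySem.Str.replace raw "cat__" "") cat_cols
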